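-- pv_equiv track=rewrite | github.com/PabloRMira/sql_formatter | sql_formatter/utils.py | identify_select_from
-- ===== SOURCE A (Python) =====
-- def identify_select_from(s):
--     "Identify positions of SELECT and FROM in query `s`"
--     # container for positions
--     positions = []
--     # counter for comments
--     k = 0  # 0 = no comment range
--     # loop over character positions
--     for i in range(len(s)):
--         if s[i:i+6].lower() == "select" and k == 0:  # catch SELECT
--             positions.append(i)
--         elif s[i:i+4].lower() == "from" and k == 0:  # catch FROM
--             positions.append(i)
--         elif s[i:i+2] in ("--" ,"/*"): # if there is an opening comment
--             k += 1
--         elif s[i:i+3] == "[C]":  # if there is a closing comment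
--             k -= 1
--     return positions
-- ===== SOURCE B (Python) =====
-- def identify_select_from(s):
--     "Identify positions of SELECT and FROM in query `s`"
--     low = s.lower()
--     n = len(s)
--     # phase 1: collect every (position, kind) event, overlapping hits included
--     events = []
--     for tok, kind in (("select", "kw"), ("from", "kw"),
--                       ("--", "open"), ("/*", "open"), ("[C]", "close")):
--         hay = low if kind == "kw" else s
--         events.extend((i, kind) for i in range(n) if hay.startswith(tok, i))
--     events.sort(key=lambda e: e[0])
--     # phase 2: sweep the events once, tracking the comment counter
--     positions = []
--     k = 0
--     for i, kind in events:
--         if kind == "open":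
--             k += 1
--         elif kind == "close":
--             k -= 1
--         elif k == 0:
--             positions.append(i)
--     return positions
-- ===== Notes on version B (the rewrite author's own statement) =====
-- stated objective: alternative
-- what changed: Replaces A's single pass that re-slices and lowercases the string at every index with a two-phase event sweep: first collect all (position, kind) token events (keyword/comment-open/comment-close, overlapping hits included) per token, then sort the events and make one pass over the events only, maintaining the comment counter.
import Mathlib
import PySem

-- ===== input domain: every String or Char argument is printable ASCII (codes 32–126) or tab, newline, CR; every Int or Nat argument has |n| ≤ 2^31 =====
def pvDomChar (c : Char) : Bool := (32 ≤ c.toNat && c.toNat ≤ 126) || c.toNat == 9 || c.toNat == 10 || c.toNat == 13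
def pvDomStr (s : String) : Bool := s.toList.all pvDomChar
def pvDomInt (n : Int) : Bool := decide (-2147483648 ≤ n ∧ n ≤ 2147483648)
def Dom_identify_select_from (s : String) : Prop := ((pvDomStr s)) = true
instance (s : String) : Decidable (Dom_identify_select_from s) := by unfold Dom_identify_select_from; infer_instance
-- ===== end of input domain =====

-- B replaces A's single stateful index pass by a two-phase event sweep (collect token events, sort, then one counter pass); alternative decomposition, no speed claim.


-- ===== PORT A =====
-- literal transliteration of A: one pass over range(len(s)), state = (positions, k)
def identify_select_from (s : String) : List Int :=
  let cs := s.toList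
  ((PySem.List.pyRange 0 (cs.length : Int) 1).foldl (fun (st : List Int × Int) i =>
      if PySem.Chars.lower (PySem.Chars.slice cs (some i) (some (i+6))) = "select".toList ∧ st.2 = 0 then
        (st.1 ++ [i], st.2)
      else if PySem.Chars.lower (PySem.Chars.slice cs (some i) (some (i+4))) = "from".toList ∧ st.2 = 0 then
        (st.1 ++ [i], st.2)
      else if PySem.Chars.slice cs (some i) (some (i+2)) = "--".toList ∨
              PySem.Chars.slice cs (some i) (some (i+2)) = "/*".toList then
        (st.1, st.2 + 1)
      else if PySem.Chars.slice cs (some i) (some (i+3)) = "[C]".toList then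
        (st.1, st.2 - 1)
      else st)
    (([] : List Int), (0 : Int))).1

-- ===== PORT B =====
-- occurrence positions of tok in hay, overlapping hits included;
-- hay.startswith(tok, i) for 0 ≤ i < len(hay) is ported exactly as startswith on hay.drop i
def pvOccs (hay : List Char) (tok : List Char) : List Int :=
  (PySem.List.pyRange 0 (hay.length : Int) 1).filter
    (fun i => PySem.Chars.startswith (hay.drop i.toNat) tok)

-- the body of B's second-phase loop over the sorted events
def pvStep (st : List Int × Int) (e : Int × String) : List Int × Int :=
  if e.2 = "open" then (st.1, st.2 + 1)
  else if e.2 = "close" then (st.1, st.2 - 1)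
  else if st.2 = 0 then (st.1 ++ [e.1], st.2)
  else st

def identify_select_from_alt (s : String) : List Int :=
  let low := PySem.Chars.lower s.toList
  -- Source B's loop over the 5-token literal tuple, unrolled in the same order
  let events : List (Int × String) :=
    (pvOccs low "select".toList).map (fun i => (i, "kw")) ++
    (pvOccs low "from".toList).map (fun i => (i, "kw")) ++
    (pvOccs s.toList "--".toList).map (fun i => (i, "open")) ++
    (pvOccs s.toList "/*".toList).map (fun i => (i, "open")) ++
    (pvOccs s.toList "[C]".toList).map (fun i => (i, "close"))
  ((PySem.List.sorted events (fun e => e.1)).foldl pvStep (([] : List Int), (0 : Int))).1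

-- ===== PRECONDITION & SPEC =====
def Spec_identify_select_from (s : String) (out : List Int) : Prop := out = identify_select_from_alt s
instance (s : String) (out : List Int) : Decidable (Spec_identify_select_from s out) := by unfold Spec_identify_select_from; infer_instance

-- ===== CLAIM (what is proved, stated in full; the proofs are below) =====
def Claim_equal_identify_select_from : Prop := ∀ (s : String), Dom_identify_select_from s → Spec_identify_select_from s (identify_select_from s)

-- ===== LEMMAS AND PROOFS =====

-- Bool matcher: tok starts at index k of hay
def pvM (hay tok : List Char) (k : Nat) : Bool := PySem.Chars.startswith (hay.drop k) tok

-- which event (if any) index k carries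
def pvKindAt (cs : List Char) (k : Nat) : Option String :=
  if pvM (PySem.Chars.lower cs) "select".toList k then some "kw"
  else if pvM (PySem.Chars.lower cs) "from".toList k then some "kw"
  else if pvM cs "--".toList k then some "open"
  else if pvM cs "/*".toList k then some "open"
  else if pvM cs "[C]".toList k then some "close"
  else none

def pvClassify (cs : List Char) (k : Nat) : Option (Int × String) :=
  (pvKindAt cs k).map (fun kd => ((k : Int), kd))

lemma pvLower_eq_map (l : List Char) :
    PySem.Chars.lower l = l.map PySem.Chars.lowerChar := by
  simp [PySem.Chars.lower]

-- a matcher pins down the character of hay at k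
lemma pvM_head {hay tok : List Char} {a : Char} {k : Nat}
    (h : pvM hay tok k = true) (ha : tok[0]? = some a) : hay[k]? = some a := by
  have hp : tok <+: hay.drop k := (PySem.Chars.startswith_iff _ _).1 h
  rcases hp with ⟨r, hr⟩
  have hlen : 0 < tok.length := by
    cases tok with
    | nil => simp at ha
    | cons x t => simp
  have : (hay.drop k)[0]? = some a := by
    rw [← hr, List.getElem?_append_left hlen, ha]
  simpa [List.getElem?_drop] using this

lemma pvM_head_lower {cs tok : List Char} {a : Char} {k : Nat}
    (h : pvM (PySem.Chars.lower cs) tok k = true) (ha : tok[0]? = some a) :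
    ∃ c, cs[k]? = some c ∧ PySem.Chars.lowerChar c = a := by
  have h1 := pvM_head h ha
  rw [pvLower_eq_map, List.getElem?_map] at h1
  cases hc : cs[k]? with
  | none => rw [hc] at h1; simp at h1
  | some c => rw [hc] at h1; simp at h1; exact ⟨c, rfl, h1⟩

-- two matchers on the same haystack at the same index see the same first character
lemma pvM_heads (a b : Char) {hay tok tok' : List Char} {k : Nat}
    (h1 : pvM hay tok k = true) (ha : tok[0]? = some a)
    (h2 : pvM hay tok' k = true) (hb : tok'[0]? = some b) : a = b := by
  have e1 := pvM_head h1 ha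
  have e2 := pvM_head h2 hb
  rw [e1] at e2; injection e2

-- a lowercase-side matcher and a raw-side matcher clash when the raw head cannot lower to the lowercase head
lemma pvLower_plain_disj (a b : Char) {cs tok tok' : List Char} {k : Nat}
    (hne : PySem.Chars.lowerChar b ≠ a)
    (h1 : pvM (PySem.Chars.lower cs) tok k = true) (ha : tok[0]? = some a)
    (h2 : pvM cs tok' k = true) (hb : tok'[0]? = some b) : False := by
  obtain ⟨c, hc, hlc⟩ := pvM_head_lower h1 ha
  have e2 := pvM_head h2 hb
  rw [hc] at e2
  injection e2 with e2
  exact hne (e2 ▸ hlc)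

-- A's slice-and-compare test at a nonnegative index equals the matcher
lemma pvSliceEq (cs tok : List Char) (k m : Nat) (hm : tok.length = m) :
    (PySem.Chars.slice cs (some (k : Int)) (some ((k : Int) + (m : Int))) = tok)
      ↔ pvM cs tok k = true := by
  have hs : PySem.Chars.slice cs (some (k : Int)) (some ((k : Int) + (m : Int)))
      = (cs.drop k).take m := by
    have h1 : ((k : Int) + (m : Int)) = ((k + m : Nat) : Int) := by push_cast; ring
    rw [h1]
    simp only [PySem.Chars.slice_eq_listSlice]
    rw [PySem.List.slice_toNat cs (by positivity) (by positivity)]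
    simp only [Int.toNat_natCast]
    congr 1
    omega
  rw [hs]
  unfold pvM
  rw [PySem.Chars.startswith_iff]
  constructor
  · intro h
    exact h ▸ List.take_prefix m (cs.drop k)
  · intro hp
    have := List.prefix_iff_eq_take.1 hp
    rw [← hm]; exact this.symm

-- same, through lower: A lowercases the slice, B lowercases the whole string once
lemma pvSliceEqLower (cs tok : List Char) (k m : Nat) (hm : tok.length = m) :
    (PySem.Chars.lower (PySem.Chars.slice cs (some (k : Int)) (some ((k : Int) + (m : Int)))) = tok)
      ↔ pvM (PySem.Chars.lower cs) tok k = true := by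
  have key : PySem.Chars.lower (PySem.Chars.slice cs (some (k : Int)) (some ((k : Int) + (m : Int))))
      = PySem.Chars.slice (PySem.Chars.lower cs) (some (k : Int)) (some ((k : Int) + (m : Int))) := by
    have h1 : ((k : Int) + (m : Int)) = ((k + m : Nat) : Int) := by push_cast; ring
    rw [h1]
    simp only [PySem.Chars.slice_eq_listSlice]
    rw [PySem.List.slice_toNat cs (by positivity) (by positivity),
        PySem.List.slice_toNat (PySem.Chars.lower cs) (by positivity) (by positivity)]
    simp [pvLower_eq_map]
  rw [key, pvSliceEq (PySem.Chars.lower cs) tok k m hm]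

-- A's loop body at index k equals "apply the classified event with pvStep"
lemma pvStepA_eq (cs : List Char) (k : Nat) (st : List Int × Int) :
    (if PySem.Chars.lower (PySem.Chars.slice cs (some (k : Int)) (some ((k : Int)+6))) = "select".toList ∧ st.2 = 0 then
        (st.1 ++ [(k : Int)], st.2)
      else if PySem.Chars.lower (PySem.Chars.slice cs (some (k : Int)) (some ((k : Int)+4))) = "from".toList ∧ st.2 = 0 then
        (st.1 ++ [(k : Int)], st.2)
      else if PySem.Chars.slice cs (some (k : Int)) (some ((k : Int)+2)) = "--".toList ∨
              PySem.Chars.slice cs (some (k : Int)) (some ((k : Int)+2)) = "/*".toList then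
        (st.1, st.2 + 1)
      else if PySem.Chars.slice cs (some (k : Int)) (some ((k : Int)+3)) = "[C]".toList then
        (st.1, st.2 - 1)
      else st)
    = (match pvClassify cs k with
       | some e => pvStep st e
       | none => st) := by
  have e6 := pvSliceEqLower cs "select".toList k 6 (by decide)
  have e4 := pvSliceEqLower cs "from".toList k 4 (by decide)
  have e2a := pvSliceEq cs "--".toList k 2 (by decide)
  have e2b := pvSliceEq cs "/*".toList k 2 (by decide)
  have e3 := pvSliceEq cs "[C]".toList k 3 (by decide)
  simp only [Nat.cast_ofNat] at e6 e4 e2a e2b e3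
  simp at e6 e4 e2a e2b e3
  simp only [pvClassify, pvKindAt]
  by_cases hS : pvM (PySem.Chars.lower cs) ['s','e','l','e','c','t'] k = true
  · have hO1 : pvM cs ['-','-'] k = false := by
      by_contra h
      exact pvLower_plain_disj 's' '-' (by decide) hS (by decide) (by simpa using h) (by decide)
    have hO2 : pvM cs ['/','*'] k = false := by
      by_contra h
      exact pvLower_plain_disj 's' '/' (by decide) hS (by decide) (by simpa using h) (by decide)
    have hC : pvM cs ['[','C',']'] k = false := by
      by_contra h
      exact pvLower_plain_disj 's' '[' (by decide) hS (by decide) (by simpa using h) (by decide)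
    by_cases h0 : st.2 = 0 <;>
      simp [e6, e4, e2a, e2b, e3, hS, hO1, hO2, hC, h0, pvStep]
  · by_cases hF : pvM (PySem.Chars.lower cs) ['f','r','o','m'] k = true
    · have hO1 : pvM cs ['-','-'] k = false := by
        by_contra h
        exact pvLower_plain_disj 'f' '-' (by decide) hF (by decide) (by simpa using h) (by decide)
      have hO2 : pvM cs ['/','*'] k = false := by
        by_contra h
        exact pvLower_plain_disj 'f' '/' (by decide) hF (by decide) (by simpa using h) (by decide)
      have hC : pvM cs ['[','C',']'] k = false := by
        by_contra h
        exact pvLower_plain_disj 'f' '[' (by decide) hF (by decide) (by simpa using h) (by decide)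
      by_cases h0 : st.2 = 0 <;>
        simp [e6, e4, e2a, e2b, e3, hS, hF, hO1, hO2, hC, h0, pvStep]
    · by_cases hO1 : pvM cs ['-','-'] k = true
      · simp [e6, e4, e2a, e2b, hS, hF, hO1, pvStep]
      · by_cases hO2 : pvM cs ['/','*'] k = true
        · simp [e6, e4, e2a, e2b, hS, hF, hO1, hO2, pvStep]
        · by_cases hC : pvM cs ['[','C',']'] k = true
          · simp [e6, e4, e2a, e2b, e3, hS, hF, hO1, hO2, hC, pvStep]
          · simp [e6, e4, e2a, e2b, e3, hS, hF, hO1, hO2, hC]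

-- pvOccs in Nat-range form
lemma pvOccs_eq (hay tok : List Char) :
    pvOccs hay tok
      = ((List.range hay.length).filter (fun k => pvM hay tok k)).map (fun (k : Nat) => (k : Int)) := by
  unfold pvOccs
  rw [PySem.List.pyRange_zero_nat, List.filter_map]
  have hpq : ((fun i : Int => PySem.Chars.startswith (hay.drop i.toNat) tok) ∘ (fun k : Nat => ((k : Nat) : Int)))
      = (fun k => pvM hay tok k) := by
    funext k; simp [pvM]
  rw [hpq]

-- insert an element in the middle of a concatenation, up to permutation
lemma pvIns {α : Type} (a : α) (A B : List α) : (a :: (A ++ B)).Perm (A ++ a :: B) :=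
  List.perm_middle.symm

-- the concatenated per-token occurrence blocks are a permutation of the classified range
lemma pvPermAux (cs : List Char) (l : List Nat) :
    (l.filterMap (pvClassify cs)).Perm
      ((l.filter (fun k => pvM (PySem.Chars.lower cs) "select".toList k)).map (fun (k : Nat) => ((k : Int), "kw")) ++
       (l.filter (fun k => pvM (PySem.Chars.lower cs) "from".toList k)).map (fun (k : Nat) => ((k : Int), "kw")) ++
       (l.filter (fun k => pvM cs "--".toList k)).map (fun (k : Nat) => ((k : Int), "open")) ++
       (l.filter (fun k => pvM cs "/*".toList k)).map (fun (k : Nat) => ((k : Int), "open")) ++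
       (l.filter (fun k => pvM cs "[C]".toList k)).map (fun (k : Nat) => ((k : Int), "close"))) := by
  induction l with
  | nil => simp
  | cons k l ih =>
    simp only [List.filterMap_cons, List.filter_cons]
    by_cases hS : pvM (PySem.Chars.lower cs) "select".toList k = true
    · have hO1 : pvM cs "--".toList k = false := by
        by_contra h
        exact pvLower_plain_disj 's' '-' (by decide) hS (by decide) (by simpa using h) (by decide)
      have hO2 : pvM cs "/*".toList k = false := by
        by_contra h
        exact pvLower_plain_disj 's' '/' (by decide) hS (by decide) (by simpa using h) (by decide)
      have hC : pvM cs "[C]".toList k = false := by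
        by_contra h
        exact pvLower_plain_disj 's' '[' (by decide) hS (by decide) (by simpa using h) (by decide)
      have hF : pvM (PySem.Chars.lower cs) "from".toList k = false := by
        by_contra h
        have := pvM_heads 's' 'f' hS (by decide) (show pvM (PySem.Chars.lower cs) "from".toList k = true by simpa using h) (by decide)
        simp at this
      simp only [pvClassify, pvKindAt, hS, hF, hO1, hO2, hC, if_true, if_false,
        Bool.false_eq_true, Option.map_some, List.map_cons, List.cons_append]
      exact ih.cons _
    · by_cases hF : pvM (PySem.Chars.lower cs) "from".toList k = true
      · have hO1 : pvM cs "--".toList k = false := by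
          by_contra h
          exact pvLower_plain_disj 'f' '-' (by decide) hF (by decide) (by simpa using h) (by decide)
        have hO2 : pvM cs "/*".toList k = false := by
          by_contra h
          exact pvLower_plain_disj 'f' '/' (by decide) hF (by decide) (by simpa using h) (by decide)
        have hC : pvM cs "[C]".toList k = false := by
          by_contra h
          exact pvLower_plain_disj 'f' '[' (by decide) hF (by decide) (by simpa using h) (by decide)
        simp only [pvClassify, pvKindAt, hS, hF, hO1, hO2, hC, if_true, if_false,
          Bool.false_eq_true, Option.map_some, List.map_cons,
          List.cons_append, List.append_assoc]
        refine (ih.cons _).trans ?_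
        have h := pvIns ((k : Int), "kw")
          ((l.filter (fun k => pvM (PySem.Chars.lower cs) "select".toList k)).map (fun (k : Nat) => ((k : Int), "kw")))
          ((l.filter (fun k => pvM (PySem.Chars.lower cs) "from".toList k)).map (fun (k : Nat) => ((k : Int), "kw")) ++
           ((l.filter (fun k => pvM cs "--".toList k)).map (fun (k : Nat) => ((k : Int), "open")) ++
            ((l.filter (fun k => pvM cs "/*".toList k)).map (fun (k : Nat) => ((k : Int), "open")) ++
             (l.filter (fun k => pvM cs "[C]".toList k)).map (fun (k : Nat) => ((k : Int), "close")))))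
        simpa [List.append_assoc] using h
      · by_cases hO1 : pvM cs "--".toList k = true
        · have hO2 : pvM cs "/*".toList k = false := by
            by_contra h
            have := pvM_heads '-' '/' hO1 (by decide) (show pvM cs "/*".toList k = true by simpa using h) (by decide)
            simp at this
          have hC : pvM cs "[C]".toList k = false := by
            by_contra h
            have := pvM_heads '-' '[' hO1 (by decide) (show pvM cs "[C]".toList k = true by simpa using h) (by decide)
            simp at this
          simp only [pvClassify, pvKindAt, hS, hF, hO1, hO2, hC, if_true, if_false,
            Bool.false_eq_true, Option.map_some, List.map_cons,
            List.cons_append, List.append_assoc]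
          refine (ih.cons _).trans ?_
          have h := pvIns ((k : Int), "open")
            ((l.filter (fun k => pvM (PySem.Chars.lower cs) "select".toList k)).map (fun (k : Nat) => ((k : Int), "kw")) ++
             (l.filter (fun k => pvM (PySem.Chars.lower cs) "from".toList k)).map (fun (k : Nat) => ((k : Int), "kw")))
            ((l.filter (fun k => pvM cs "--".toList k)).map (fun (k : Nat) => ((k : Int), "open")) ++
             ((l.filter (fun k => pvM cs "/*".toList k)).map (fun (k : Nat) => ((k : Int), "open")) ++
              (l.filter (fun k => pvM cs "[C]".toList k)).map (fun (k : Nat) => ((k : Int), "close"))))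
          simpa [List.append_assoc] using h
        · by_cases hO2 : pvM cs "/*".toList k = true
          · have hC : pvM cs "[C]".toList k = false := by
              by_contra h
              have := pvM_heads '/' '[' hO2 (by decide) (show pvM cs "[C]".toList k = true by simpa using h) (by decide)
              simp at this
            simp only [pvClassify, pvKindAt, hS, hF, hO1, hO2, hC, if_true, if_false,
              Bool.false_eq_true, Option.map_some, List.map_cons,
              List.cons_append, List.append_assoc]
            refine (ih.cons _).trans ?_
            have h := pvIns ((k : Int), "open")
              ((l.filter (fun k => pvM (PySem.Chars.lower cs) "select".toList k)).map (fun (k : Nat) => ((k : Int), "kw")) ++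
               ((l.filter (fun k => pvM (PySem.Chars.lower cs) "from".toList k)).map (fun (k : Nat) => ((k : Int), "kw")) ++
                (l.filter (fun k => pvM cs "--".toList k)).map (fun (k : Nat) => ((k : Int), "open"))))
              ((l.filter (fun k => pvM cs "/*".toList k)).map (fun (k : Nat) => ((k : Int), "open")) ++
               (l.filter (fun k => pvM cs "[C]".toList k)).map (fun (k : Nat) => ((k : Int), "close")))
            simpa [List.append_assoc] using h
          · by_cases hC : pvM cs "[C]".toList k = true
            · simp only [pvClassify, pvKindAt, hS, hF, hO1, hO2, hC, if_true, if_false,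
                Bool.false_eq_true, Option.map_some, List.map_cons, List.append_assoc]
              refine (ih.cons _).trans ?_
              have h := pvIns ((k : Int), "close")
                ((l.filter (fun k => pvM (PySem.Chars.lower cs) "select".toList k)).map (fun (k : Nat) => ((k : Int), "kw")) ++
                 ((l.filter (fun k => pvM (PySem.Chars.lower cs) "from".toList k)).map (fun (k : Nat) => ((k : Int), "kw")) ++
                  ((l.filter (fun k => pvM cs "--".toList k)).map (fun (k : Nat) => ((k : Int), "open")) ++
                   (l.filter (fun k => pvM cs "/*".toList k)).map (fun (k : Nat) => ((k : Int), "open")))))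
                ((l.filter (fun k => pvM cs "[C]".toList k)).map (fun (k : Nat) => ((k : Int), "close")))
              simpa [List.append_assoc] using h
            · simp only [pvClassify, pvKindAt, hS, hF, hO1, hO2, hC, if_false,
                Bool.false_eq_true]
              simpa using ih

lemma pvPermEvents (cs : List Char) :
    ((pvOccs (PySem.Chars.lower cs) "select".toList).map (fun i => (i, "kw")) ++
     (pvOccs (PySem.Chars.lower cs) "from".toList).map (fun i => (i, "kw")) ++
     (pvOccs cs "--".toList).map (fun i => (i, "open")) ++
     (pvOccs cs "/*".toList).map (fun i => (i, "open")) ++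
     (pvOccs cs "[C]".toList).map (fun i => (i, "close"))).Perm
    ((List.range cs.length).filterMap (pvClassify cs)) := by
  have hlen : (PySem.Chars.lower cs).length = cs.length := by
    rw [pvLower_eq_map, List.length_map]
  simp only [pvOccs_eq, hlen, List.map_map, Function.comp_def]
  exact (pvPermAux cs (List.range cs.length)).symm

lemma pvPairwiseE (cs : List Char) :
    ((List.range cs.length).filterMap (pvClassify cs)).Pairwise (fun a b => a.1 < b.1) := by
  refine List.Pairwise.filterMap _ (fun a a' hR b hb b' hb' => ?_) List.pairwise_lt_range
  unfold pvClassify at hb hb'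
  rcases Option.map_eq_some_iff.1 hb with ⟨ka, _, rfl⟩
  rcases Option.map_eq_some_iff.1 hb' with ⟨kb, _, rfl⟩
  simpa using hR

-- ===== VERDICT (by name: the statement is the Claim_ definition above) =====
theorem identify_select_from_spec : Claim_equal_identify_select_from := by
  intro s _
  unfold Spec_identify_select_from identify_select_from identify_select_from_alt
  have hsorted : PySem.List.sorted
      ((pvOccs (PySem.Chars.lower s.toList) "select".toList).map (fun i => (i, "kw")) ++
       (pvOccs (PySem.Chars.lower s.toList) "from".toList).map (fun i => (i, "kw")) ++
       (pvOccs s.toList "--".toList).map (fun i => (i, "open")) ++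
       (pvOccs s.toList "/*".toList).map (fun i => (i, "open")) ++
       (pvOccs s.toList "[C]".toList).map (fun i => (i, "close"))) (fun e => e.1)
      = (List.range s.toList.length).filterMap (pvClassify s.toList) :=
    PySem.List.sorted_eq_of_perm_of_pairwise_lt _ _ _
      ((pvPermEvents s.toList).symm) (pvPairwiseE s.toList)
  simp only [hsorted, List.foldl_filterMap, PySem.List.pyRange_zero_nat, List.foldl_map]
  congr 1
  apply PySem.List.foldl_congr_mem
  intro st k _
  rw [pvStepA_eq s.toList k st]
  cases pvClassify s.toList k <;> rfl
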